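-- pv_equiv track=rewrite | github.com/LikeethGUrs-commits/TheMediscanAI | server/emergency_summarizer.py | categorize_by_risk_level
-- ===== SOURCE A (Python) =====
-- from typing import Dict, List, Any, Tuple
--
-- def categorize_by_risk_level(records: List[Dict]) -> Dict[str, List[Dict]]:
--     """Categorize records by risk level."""
--     categories = {
--         'critical': [],
--         'high': [],
--         'medium': [],
--         'low': []
--     }
--
--     for record in records:
--         risk = record.get('risk', 'low').lower()
--         if risk in categories:
--             categories[risk].append(record)
--         else:
--             categories['low'].append(record)
--
--     return categories
-- ===== SOURCE B (Python) =====
-- def categorize_by_risk_level(records):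
--     def risk(r):
--         return r.get('risk', 'low').lower()
--     return {
--         'critical': [r for r in records if risk(r) == 'critical'],
--         'high': [r for r in records if risk(r) == 'high'],
--         'medium': [r for r in records if risk(r) == 'medium'],
--         'low': [r for r in records if risk(r) not in ('critical', 'high', 'medium')],
--     }
-- ===== Notes on version B (the rewrite author's own statement) =====
-- stated objective: alternative
-- what changed: Replaces the single dispatch loop appending into a mutable four-bucket dict with four independent list-comprehension filter passes (the low bucket filtered by the complement of the other three labels), assembling the result dict once in fixed key order.
import Mathlib
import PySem

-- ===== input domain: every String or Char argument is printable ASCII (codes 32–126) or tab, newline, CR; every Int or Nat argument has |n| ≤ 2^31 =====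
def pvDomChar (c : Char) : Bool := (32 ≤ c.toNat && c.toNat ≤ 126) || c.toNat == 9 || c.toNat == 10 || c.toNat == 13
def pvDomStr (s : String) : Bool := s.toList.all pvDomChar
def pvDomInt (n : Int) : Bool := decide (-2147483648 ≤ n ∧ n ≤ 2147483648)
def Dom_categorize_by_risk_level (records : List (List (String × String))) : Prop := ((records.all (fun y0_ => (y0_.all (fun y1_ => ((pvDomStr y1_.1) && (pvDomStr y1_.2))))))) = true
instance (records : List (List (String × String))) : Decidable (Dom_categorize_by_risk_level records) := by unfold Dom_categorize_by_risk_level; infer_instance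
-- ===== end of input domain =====

-- B re-implements A's one dispatch loop as four independent filter passes (objective: alternative); same values on all inputs.

-- ===== PORT A =====
-- risk = record.get('risk', 'low').lower()
def pvRiskA (record : List (String × String)) : String :=
  PySem.Str.lower ((PySem.Dict.mk record).getD "risk" "low")

-- the loop body: dispatch `record` into the four-bucket state (critical, high, medium, low);
-- an unknown risk falls through to the 'low' bucket
def pvStepA (st : List (List (String × String)) × List (List (String × String)) × List (List (String × String)) × List (List (String × String)))
    (record : List (String × String)) :
    List (List (String × String)) × List (List (String × String)) × List (List (String × String)) × List (List (String × String)) :=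
  let risk := pvRiskA record
  if risk = "critical" then (st.1 ++ [record], st.2.1, st.2.2.1, st.2.2.2)
  else if risk = "high" then (st.1, st.2.1 ++ [record], st.2.2.1, st.2.2.2)
  else if risk = "medium" then (st.1, st.2.1, st.2.2.1 ++ [record], st.2.2.2)
  else (st.1, st.2.1, st.2.2.1, st.2.2.2 ++ [record])

def categorize_by_risk_level (records : List (List (String × String))) : List (String × List (List (String × String))) :=
  let st := records.foldl pvStepA ([], [], [], [])
  [("critical", st.1), ("high", st.2.1), ("medium", st.2.2.1), ("low", st.2.2.2)]

-- ===== PORT B =====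
def pvRiskB (record : List (String × String)) : String :=
  PySem.Str.lower ((PySem.Dict.mk record).getD "risk" "low")

def categorize_by_risk_level_alt (records : List (List (String × String))) : List (String × List (List (String × String))) :=
  [("critical", records.filter (fun r => pvRiskB r == "critical")),
   ("high", records.filter (fun r => pvRiskB r == "high")),
   ("medium", records.filter (fun r => pvRiskB r == "medium")),
   ("low", records.filter (fun r => !(pvRiskB r == "critical" || pvRiskB r == "high" || pvRiskB r == "medium")))]

-- ===== PRECONDITION & SPEC =====
def Spec_categorize_by_risk_level (records : List (List (String × String))) (out : List (String × List (List (String × String)))) : Prop := out = categorize_by_risk_level_alt records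
instance (records : List (List (String × String))) (out : List (String × List (List (String × String)))) : Decidable (Spec_categorize_by_risk_level records out) := by unfold Spec_categorize_by_risk_level; infer_instance

-- ===== CLAIM (what is proved, stated in full; the proofs are below) =====
def Claim_equal_categorize_by_risk_level : Prop := ∀ (records : List (List (String × String))), Dom_categorize_by_risk_level records → Spec_categorize_by_risk_level records (categorize_by_risk_level records)

-- ===== LEMMAS AND PROOFS =====

-- loop invariant: A's fold from any state appends exactly B's four filtered lists
lemma pvFoldA_eq_filters (records : List (List (String × String)))
    (c h m l : List (List (String × String))) :
    records.foldl pvStepA (c, h, m, l) =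
      (c ++ records.filter (fun r => pvRiskB r == "critical"),
       h ++ records.filter (fun r => pvRiskB r == "high"),
       m ++ records.filter (fun r => pvRiskB r == "medium"),
       l ++ records.filter (fun r => !(pvRiskB r == "critical" || pvRiskB r == "high" || pvRiskB r == "medium"))) := by
  induction records generalizing c h m l with
  | nil => simp
  | cons r rs ih =>
    have hrr : pvRiskB r = pvRiskA r := rfl
    simp only [List.foldl_cons, List.filter_cons, pvStepA]
    by_cases h1 : pvRiskA r = "critical"
    · simp [h1, hrr, ih]
    · by_cases h2 : pvRiskA r = "high"
      · simp [h2, hrr, ih]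
      · by_cases h3 : pvRiskA r = "medium"
        · simp [h3, hrr, ih]
        · simp [h1, h2, h3, hrr, ih]

-- ===== VERDICT (by name: the statement is the Claim_ definition above) =====
theorem categorize_by_risk_level_spec : Claim_equal_categorize_by_risk_level := by
  intro records _
  unfold Spec_categorize_by_risk_level categorize_by_risk_level categorize_by_risk_level_alt
  simp [pvFoldA_eq_filters]
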